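-- pv_equiv track=rewrite | github.com/openjason/catch_data | match/shebaofilecheck.py | double_character_proc
-- ===== SOURCE A (Python) =====
-- def double_character_proc(chars):
--     chars_len = len(chars)
--     if chars_len < 10:
--             return chars
--     else:
--         if chars_len % 2 == 0:
--             r_chars = ''
--             for tint in range(0,chars_len//2):
--                 if chars[tint*2] == chars[tint*2+1]:
--                     r_chars = r_chars + chars[tint*2]
--                 else:
--                     return chars
--             return r_chars
--     return chars
-- ===== SOURCE B (Python) =====
-- def double_character_proc(chars):
--     if len(chars) < 10:
--         return chars
--     evens = chars[::2]
--     odds = chars[1::2]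
--     return evens if evens == odds else chars
-- ===== Notes on version B (the rewrite author's own statement) =====
-- stated objective: idiomatic
-- what changed: Replaces the index-by-index loop over range(n//2) (with character accumulation and early return) by comparing the two stride-2 slices chars[::2] and chars[1::2] and returning the even slice on match; odd lengths fall out automatically since the slices differ in length.
import Mathlib
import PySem

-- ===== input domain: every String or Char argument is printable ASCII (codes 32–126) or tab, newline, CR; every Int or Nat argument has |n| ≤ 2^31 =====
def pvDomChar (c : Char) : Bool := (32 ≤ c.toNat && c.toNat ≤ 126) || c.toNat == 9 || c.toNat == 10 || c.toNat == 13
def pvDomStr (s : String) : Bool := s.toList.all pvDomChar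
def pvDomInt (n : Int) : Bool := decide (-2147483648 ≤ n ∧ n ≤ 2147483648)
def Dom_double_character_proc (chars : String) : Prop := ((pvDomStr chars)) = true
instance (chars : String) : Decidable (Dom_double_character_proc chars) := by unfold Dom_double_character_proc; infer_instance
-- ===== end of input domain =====

-- B replaces A's index-by-index pair loop by comparing the two stride-2 slices (evens vs odds)
-- and returning the even slice on match: same results, a simpler decomposition (no speed claim).

-- ===== PORT A =====
-- the for-loop over range(0, chars_len//2) with its early 'return chars'
def dcpLoop (chars : String) (ts : List Int) (r : String) : String :=
  match ts with
  | [] => r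
  | t :: rest =>
    match PySem.Str.pyGet? chars (t * 2), PySem.Str.pyGet? chars (t * 2 + 1) with
    | some a, some b => if a == b then dcpLoop chars rest (r.push a) else chars
    | _, _ => chars   -- unreachable: indices stay in range

def double_character_proc (chars : String) : String :=
  let charsLen := PySem.Str.len chars
  if charsLen < 10 then chars
  else
    if PySem.Int.mod charsLen 2 == 0 then
      dcpLoop chars (PySem.List.pyRange 0 (PySem.Int.floordiv charsLen 2) 1) ""
    else chars

-- ===== PORT B =====
def double_character_proc_alt (chars : String) : String :=
  if PySem.Str.len chars < 10 then chars
  else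
    match PySem.Str.slice? chars none none 2, PySem.Str.slice? chars (some 1) none 2 with
    | some ev, some od => if ev == od then ev else chars
    | _, _ => chars   -- unreachable: step 2 ≠ 0

-- ===== PRECONDITION & SPEC =====
def Spec_double_character_proc (chars : String) (out : String) : Prop := out = double_character_proc_alt chars
instance (chars : String) (out : String) : Decidable (Spec_double_character_proc chars out) := by unfold Spec_double_character_proc; infer_instance

-- ===== CLAIM (what is proved, stated in full; the proofs are below) =====
def Claim_equal_double_character_proc : Prop := ∀ (chars : String), Dom_double_character_proc chars → Spec_double_character_proc chars (double_character_proc chars)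

-- ===== LEMMAS AND PROOFS =====

-- the characters at even / odd positions
def pvEvens {α : Type} : List α → List α
  | [] => []
  | [a] => [a]
  | a :: _ :: rest => a :: pvEvens rest

def pvOdds {α : Type} : List α → List α
  | [] => []
  | [_] => []
  | _ :: b :: rest => b :: pvOdds rest

theorem pvEvens_length {α : Type} : ∀ (l : List α), (pvEvens l).length = (l.length + 1) / 2
  | [] => by simp [pvEvens]
  | [_] => by simp [pvEvens]
  | _ :: _ :: rest => by simp [pvEvens, pvEvens_length rest]; omega

theorem pvOdds_length {α : Type} : ∀ (l : List α), (pvOdds l).length = l.length / 2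
  | [] => by simp [pvOdds]
  | [_] => by simp [pvOdds]
  | _ :: _ :: rest => by simp [pvOdds, pvOdds_length rest]; omega

theorem filterMap_evens {α : Type} : ∀ (l : List α),
    List.filterMap (fun k => l[2 * k]?) (List.range ((l.length + 1) / 2)) = pvEvens l
  | [] => by simp [pvEvens]
  | [a] => by simp [pvEvens]
  | a :: b :: rest => by
    have h : ((a :: b :: rest).length + 1) / 2 = (rest.length + 1) / 2 + 1 := by
      simp; omega
    rw [h, List.range_succ_eq_map]
    simp only [List.filterMap_cons, List.filterMap_map]
    have : (fun k => (a :: b :: rest)[2 * (k + 1)]?) = (fun k => rest[2 * k]?) := by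
      funext k
      have : 2 * (k + 1) = 2 * k + 2 := by omega
      simp [this]
    simp only [Function.comp_def]
    simp only [show ∀ k, 2 * (k + 1) = 2 * k + 1 + 1 from fun k => by omega]
    simp [filterMap_evens rest, pvEvens]

theorem filterMap_odds {α : Type} : ∀ (l : List α),
    List.filterMap (fun k => l[2 * k + 1]?) (List.range (l.length / 2)) = pvOdds l
  | [] => by simp [pvOdds]
  | [_] => by simp [pvOdds]
  | a :: b :: rest => by
    have h : (a :: b :: rest).length / 2 = rest.length / 2 + 1 := by
      simp; omega
    rw [h, List.range_succ_eq_map]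
    simp only [List.filterMap_cons, List.filterMap_map, Function.comp_def]
    simp only [show ∀ k, 2 * (k + 1) + 1 = 2 * k + 1 + 1 + 1 from fun k => by omega]
    simp [filterMap_odds rest, pvOdds]

theorem slice?_evens {α : Type} (l : List α) :
    PySem.List.slice? l none none 2 = some (pvEvens l) := by
  rw [← filterMap_evens]
  simp only [PySem.List.slice?, PySem.List.sliceIndices]
  norm_num
  have hc : (if 0 < l.length then (((l.length : Int) + 2 - 1) / 2).toNat else 0) = (l.length + 1) / 2 := by
    split_ifs with h <;> omega
  rw [hc]
  apply List.filterMap_congr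
  intro x _
  have hx : (2 * (x : Int)).toNat = 2 * x := by omega
  rw [hx]

theorem slice?_odds {α : Type} (l : List α) :
    PySem.List.slice? l (some 1) none 2 = some (pvOdds l) := by
  rw [← filterMap_odds]
  match l with
  | [] =>
    simp only [PySem.List.slice?, PySem.List.sliceIndices]
    norm_num
  | a :: t =>
    simp only [PySem.List.slice?, PySem.List.sliceIndices]
    norm_num
    have hc : (if 0 < t.length then (((t.length : Int) + 2 - 1) / 2).toNat else 0) = (t.length + 1) / 2 := by
      split_ifs with h <;> omega
    rw [hc]
    apply List.filterMap_congr
    intro x _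
    have hx : (1 + 2 * (x : Int)).toNat = 2 * x + 1 := by omega
    rw [hx]
    simp

theorem dcpLoop_eq (chars : String) (m : Nat) (hm : chars.toList.length = 2 * m) :
    ∀ (j k : Nat) (r : String), k + j = m →
      dcpLoop chars (PySem.List.pyRange (k : Int) (m : Int) 1) r =
        (if pvEvens (chars.toList.drop (2 * k)) = pvOdds (chars.toList.drop (2 * k))
         then r ++ String.ofList (pvEvens (chars.toList.drop (2 * k))) else chars) := by
  intro j
  induction j with
  | zero =>
    intro k r hk
    have hk' : k = m := by omega
    subst hk'
    have hnil : chars.toList.drop (2 * k) = [] := by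
      apply List.drop_eq_nil_of_le; omega
    rw [PySem.List.pyRange_one]
    simp [hnil, pvEvens, pvOdds, dcpLoop]
  | succ j ih =>
    intro k r hk
    have hklt : ((k : Int)) < (m : Int) := by exact_mod_cast (by omega : k < m)
    rw [PySem.List.pyRange_one_cons hklt]
    have hdlen : (chars.toList.drop (2 * k)).length = 2 * m - 2 * k := by simp [hm]
    obtain ⟨a, d1, hd1⟩ := List.exists_cons_of_ne_nil
      (by intro h; rw [h] at hdlen; simp at hdlen; omega : chars.toList.drop (2 * k) ≠ [])
    obtain ⟨b, t, hd2⟩ := List.exists_cons_of_ne_nil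
      (by intro h; rw [hd1, h] at hdlen; simp at hdlen; omega : d1 ≠ [])
    subst hd2
    have hga : chars.toList[2 * k]? = some a := by
      have h0 : (List.drop (2 * k) chars.toList)[0]? = chars.toList[2 * k + 0]? := List.getElem?_drop
      rw [hd1] at h0; simpa using h0.symm
    have hgb : chars.toList[2 * k + 1]? = some b := by
      have h1 : (List.drop (2 * k) chars.toList)[1]? = chars.toList[2 * k + 1]? := List.getElem?_drop
      rw [hd1] at h1; simpa using h1.symm
    have hdrop2 : chars.toList.drop (2 * (k + 1)) = t := by
      have h2 : chars.toList.drop (2 * (k + 1)) = List.drop 2 (List.drop (2 * k) chars.toList) := by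
        rw [List.drop_drop, show 2 * k + 2 = 2 * (k + 1) from by omega]
      rw [h2, hd1, List.drop_succ_cons, List.drop_succ_cons, List.drop_zero]
    show dcpLoop chars ((k : Int) :: PySem.List.pyRange ((k : Int) + 1) (m : Int) 1) r = _
    unfold dcpLoop
    have e1 : ((k : Int)) * 2 = ((2 * k : Nat) : Int) := by push_cast; ring
    have e2 : ((k : Int)) * 2 + 1 = ((2 * k + 1 : Nat) : Int) := by push_cast; ring
    rw [e2, e1, PySem.Str.pyGet?_natCast, PySem.Str.pyGet?_natCast, hga, hgb]
    have e3 : ((k : Int)) + 1 = (((k + 1 : Nat)) : Int) := by push_cast; ring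
    rw [e3]
    by_cases hab : a = b
    · subst hab
      simp only [beq_self_eq_true, if_true]
      rw [ih (k + 1) (r.push a) (by omega), hdrop2, hd1]
      by_cases het : pvEvens t = pvOdds t
      · simp only [pvEvens, pvOdds, het, if_true]
        apply String.toList_inj.mp
        simp
      · rw [if_neg het, if_neg (by simp only [pvEvens, pvOdds]; simp [het])]
    · rw [hd1]
      have hbeq : (a == b) = false := beq_eq_false_iff_ne.mpr hab
      simp only [hbeq, Bool.false_eq_true, if_false]
      rw [if_neg (by simp only [pvEvens, pvOdds]; simp [hab])]

theorem double_character_proc_spec' (chars : String) :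
    double_character_proc chars = double_character_proc_alt chars := by
  unfold double_character_proc double_character_proc_alt
  have hlen : PySem.Str.len chars = (chars.toList.length : Int) := rfl
  by_cases h10 : PySem.Str.len chars < 10
  · rw [if_pos h10, if_pos h10]
  · rw [if_neg h10, if_neg h10]
    have hslE : PySem.Str.slice? chars none none 2 = some (String.ofList (pvEvens chars.toList)) := by
      simp [PySem.Str.slice?, PySem.Chars.slice?_eq_listSlice?, slice?_evens]
    have hslO : PySem.Str.slice? chars (some 1) none 2 = some (String.ofList (pvOdds chars.toList)) := by
      simp [PySem.Str.slice?, PySem.Chars.slice?_eq_listSlice?, slice?_odds]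
    simp only [hslE, hslO]
    by_cases hev : chars.toList.length % 2 = 0
    · obtain ⟨m, hm⟩ : ∃ m, chars.toList.length = 2 * m := ⟨chars.toList.length / 2, by omega⟩
      have hmod : (PySem.Int.mod (PySem.Str.len chars) 2 == 0) = true := by
        rw [hlen]
        simp only [PySem.Int.mod, Int.fmod_eq_emod, beq_iff_eq]
        omega
      rw [if_pos hmod]
      have hfd : PySem.Int.floordiv (PySem.Str.len chars) 2 = (m : Int) := by
        rw [hlen, hm]
        simp [PySem.Int.floordiv, Int.fdiv_eq_ediv]
      rw [hfd]
      have h0 : (0 : Int) = ((0 : Nat) : Int) := rfl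
      rw [h0, dcpLoop_eq chars m (by omega) m 0 "" (by omega)]
      simp only [Nat.mul_zero, List.drop_zero]
      by_cases heq : pvEvens chars.toList = pvOdds chars.toList
      · rw [if_pos heq, if_pos (by rw [heq]; exact beq_self_eq_true _)]
        apply String.toList_inj.mp
        simp [heq]
      · rw [if_neg heq, if_neg (by intro h; exact heq (by
          have := congrArg String.toList (eq_of_beq h)
          simpa using this))]
    · have hmod : (PySem.Int.mod (PySem.Str.len chars) 2 == 0) = false := by
        rw [hlen]
        simp only [PySem.Int.mod, Int.fmod_eq_emod]
        simp only [beq_eq_false_iff_ne, ne_eq]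
        omega
      rw [if_neg (by rw [hmod]; simp)]
      rw [if_neg (by
        intro h
        have := congrArg String.toList (eq_of_beq h)
        simp at this
        have hl := congrArg List.length this
        rw [pvEvens_length, pvOdds_length] at hl
        omega)]

-- ===== VERDICT (by name: the statement is the Claim_ definition above) =====
theorem double_character_proc_spec : Claim_equal_double_character_proc := by
  intro chars _
  unfold Spec_double_character_proc
  exact double_character_proc_spec' chars
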